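-- pv_equiv track=rewrite | github.com/hmcts/azure-pricing-api-comparison | compare_disk_prices.py | get_premiumssd_tier
-- ===== SOURCE A (Python) =====
-- def get_premiumssd_tier(size_gb):
--     # Mapping based on Azure Standard SSD disk sizes (as of 2024)
--     # https://learn.microsoft.com/en-us/azure/virtual-machines/disks-types#standard-ssd
--     # This can be extended as needed
--     size_to_tier = [
--         (4, "P1"),
--         (8, "P2"),
--         (16, "P3"),
--         (32, "P4"),
--         (64, "P6"),
--         (128, "P10"),
--         (256, "P15"),
--         (512, "P20"),
--         (1024, "P30"),
--         (2048, "P40"),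
--         (4096, "P50"),
--         (8192, "P60"),
--         (16384, "P70"),
--         (32767, "P80"),
--     ]
--     for max_size, tier in size_to_tier:
--         if size_gb <= max_size:
--             return tier
--     return f"P{size_gb}"  # fallback
-- ===== SOURCE B (Python) =====
-- _THRESHOLDS = [4, 8, 16, 32, 64, 128, 256, 512, 1024, 2048, 4096, 8192, 16384, 32767]
-- _TIERS = ["P1", "P2", "P3", "P4", "P6", "P10", "P15", "P20", "P30", "P40", "P50", "P60", "P70", "P80"]
--
-- def _bisect_left(a, x):
--     lo, hi = 0, len(a)
--     while lo < hi:
--         mid = (lo + hi) // 2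
--         if a[mid] < x:
--             lo = mid + 1
--         else:
--             hi = mid
--     return lo
--
-- def get_premiumssd_tier(size_gb):
--     i = _bisect_left(_THRESHOLDS, size_gb)
--     if i < len(_THRESHOLDS):
--         return _TIERS[i]
--     return f"P{size_gb}"  # fallback
-- ===== Notes on version B (the rewrite author's own statement) =====
-- stated objective: idiomatic
-- what changed: Replaces A's linear scan of the (max_size, tier) table with a hand-written bisect_left binary search over a parallel sorted threshold list, indexing into a tier list (fallback unchanged).
import Mathlib
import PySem

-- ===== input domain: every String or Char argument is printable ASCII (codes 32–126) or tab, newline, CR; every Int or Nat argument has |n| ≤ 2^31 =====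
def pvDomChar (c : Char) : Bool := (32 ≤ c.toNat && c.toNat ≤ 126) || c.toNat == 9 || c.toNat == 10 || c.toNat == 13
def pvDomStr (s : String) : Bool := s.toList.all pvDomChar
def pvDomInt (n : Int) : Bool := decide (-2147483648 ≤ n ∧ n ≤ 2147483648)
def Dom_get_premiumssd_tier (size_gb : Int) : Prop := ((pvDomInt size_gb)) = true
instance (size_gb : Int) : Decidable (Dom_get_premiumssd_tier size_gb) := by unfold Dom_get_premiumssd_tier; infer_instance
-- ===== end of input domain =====

-- B replaces A's linear scan through the tier table with a binary search (hand-written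
-- bisect_left) over a sorted threshold list; objective: idiomatic/alternative, same result.

-- ===== PORT A =====
-- literal transliteration: scan the (max_size, tier) table, return the first tier with size_gb ≤ max_size
def pyScanTable (size_gb : Int) : List (Int × String) → String
  | [] => "P" ++ PySem.Int.toStr size_gb  -- fallback f"P{size_gb}"
  | (max_size, tier) :: rest =>
      if size_gb ≤ max_size then tier else pyScanTable size_gb rest

def get_premiumssd_tier (size_gb : Int) : String :=
  let size_to_tier : List (Int × String) :=
    [(4, "P1"), (8, "P2"), (16, "P3"), (32, "P4"), (64, "P6"), (128, "P10"),
     (256, "P15"), (512, "P20"), (1024, "P30"), (2048, "P40"), (4096, "P50"),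
     (8192, "P60"), (16384, "P70"), (32767, "P80")]
  pyScanTable size_gb size_to_tier

-- ===== PORT B =====
def bThresholds : List Int := [4, 8, 16, 32, 64, 128, 256, 512, 1024, 2048, 4096, 8192, 16384, 32767]
def bTiers : List String := ["P1", "P2", "P3", "P4", "P6", "P10", "P15", "P20", "P30", "P40", "P50", "P60", "P70", "P80"]

-- hand-written bisect_left from Source B; fuel is only a totality guard (hi - lo halves each step)
def bisectLeft : Nat → List Int → Int → Nat → Nat → Nat
  | 0, _, _, lo, _ => lo
  | fuel + 1, a, x, lo, hi =>
      if lo < hi then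
        let mid := (lo + hi) / 2
        if a.getD mid 0 < x then bisectLeft fuel a x (mid + 1) hi
        else bisectLeft fuel a x lo mid
      else lo

def get_premiumssd_tier_alt (size_gb : Int) : String :=
  let i := bisectLeft bThresholds.length bThresholds size_gb 0 bThresholds.length
  if i < bThresholds.length then bTiers.getD i ""
  else "P" ++ PySem.Int.toStr size_gb  -- fallback f"P{size_gb}"

-- ===== PRECONDITION & SPEC =====
def Spec_get_premiumssd_tier (size_gb : Int) (out : String) : Prop := out = get_premiumssd_tier_alt size_gb
instance (size_gb : Int) (out : String) : Decidable (Spec_get_premiumssd_tier size_gb out) := by unfold Spec_get_premiumssd_tier; infer_instance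

-- ===== CLAIM (what is proved, stated in full; the proofs are below) =====
def Claim_equal_get_premiumssd_tier : Prop := ∀ (size_gb : Int), Dom_get_premiumssd_tier size_gb → Spec_get_premiumssd_tier size_gb (get_premiumssd_tier size_gb)

-- ===== LEMMAS AND PROOFS =====

-- ===== VERDICT (by name: the statement is the Claim_ definition above) =====
set_option maxHeartbeats 2000000 in
theorem get_premiumssd_tier_spec : Claim_equal_get_premiumssd_tier := by
  intro size_gb _
  unfold Spec_get_premiumssd_tier get_premiumssd_tier get_premiumssd_tier_alt
  simp only [pyScanTable]
  simp [bisectLeft, bThresholds, bTiers]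
  by_cases h0 : size_gb ≤ (4:Int)
  · simp [show ¬ (4:Int) < size_gb from by omega, show size_gb ≤ (4:Int) from by omega, show ¬ (8:Int) < size_gb from by omega, show size_gb ≤ (8:Int) from by omega, show ¬ (16:Int) < size_gb from by omega, show size_gb ≤ (16:Int) from by omega, show ¬ (32:Int) < size_gb from by omega, show size_gb ≤ (32:Int) from by omega, show ¬ (64:Int) < size_gb from by omega, show size_gb ≤ (64:Int) from by omega, show ¬ (128:Int) < size_gb from by omega, show size_gb ≤ (128:Int) from by omega, show ¬ (256:Int) < size_gb from by omega, show size_gb ≤ (256:Int) from by omega, show ¬ (512:Int) < size_gb from by omega, show size_gb ≤ (512:Int) from by omega, show ¬ (1024:Int) < size_gb from by omega, show size_gb ≤ (1024:Int) from by omega, show ¬ (2048:Int) < size_gb from by omega, show size_gb ≤ (2048:Int) from by omega, show ¬ (4096:Int) < size_gb from by omega, show size_gb ≤ (4096:Int) from by omega, show ¬ (8192:Int) < size_gb from by omega, show size_gb ≤ (8192:Int) from by omega, show ¬ (16384:Int) < size_gb from by omega, show size_gb ≤ (16384:Int) from by omega, show ¬ (32767:Int) < size_gb from by omega, show size_gb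 ≤ (32767:Int) from by omega, *]
  by_cases h1 : size_gb ≤ (8:Int)
  · simp [show (4:Int) < size_gb from by omega, show ¬ (8:Int) < size_gb from by omega, show size_gb ≤ (8:Int) from by omega, show ¬ (16:Int) < size_gb from by omega, show size_gb ≤ (16:Int) from by omega, show ¬ (32:Int) < size_gb from by omega, show size_gb ≤ (32:Int) from by omega, show ¬ (64:Int) < size_gb from by omega, show size_gb ≤ (64:Int) from by omega, show ¬ (128:Int) < size_gb from by omega, show size_gb ≤ (128:Int) from by omega, show ¬ (256:Int) < size_gb from by omega, show size_gb ≤ (256:Int) from by omega, show ¬ (512:Int) < size_gb from by omega, show size_gb ≤ (512:Int) from by omega, show ¬ (1024:Int) < size_gb from by omega, show size_gb ≤ (1024:Int) from by omega, show ¬ (2048:Int) < size_gb from by omega, show size_gb ≤ (2048:Int) from by omega, show ¬ (4096:Int) < size_gb from by omega, show size_gb ≤ (4096:Int) from by omega, show ¬ (8192:Int) < size_gb from by omega, show size_gb ≤ (8192:Int) from by omega, show ¬ (16384:Int) < size_gb from by omega, show size_gb ≤ (16384:Int) from by omega, show ¬ (32767:Int) < size_gb from by omega, show size_gb ≤ (32767:Int)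 from by omega, *]
  by_cases h2 : size_gb ≤ (16:Int)
  · simp [show (4:Int) < size_gb from by omega, show (8:Int) < size_gb from by omega, show ¬ (16:Int) < size_gb from by omega, show size_gb ≤ (16:Int) from by omega, show ¬ (32:Int) < size_gb from by omega, show size_gb ≤ (32:Int) from by omega, show ¬ (64:Int) < size_gb from by omega, show size_gb ≤ (64:Int) from by omega, show ¬ (128:Int) < size_gb from by omega, show size_gb ≤ (128:Int) from by omega, show ¬ (256:Int) < size_gb from by omega, show size_gb ≤ (256:Int) from by omega, show ¬ (512:Int) < size_gb from by omega, show size_gb ≤ (512:Int) from by omega, show ¬ (1024:Int) < size_gb from by omega, show size_gb ≤ (1024:Int) from by omega, show ¬ (2048:Int) < size_gb from by omega, show size_gb ≤ (2048:Int) from by omega, show ¬ (4096:Int) < size_gb from by omega, show size_gb ≤ (4096:Int) from by omega, show ¬ (8192:Int) < size_gb from by omega, show size_gb ≤ (8192:Int) from by omega, show ¬ (16384:Int) < size_gb from by omega, show size_gb ≤ (16384:Int) from by omega, show ¬ (32767:Int) < size_gb from by omega, show size_gb ≤ (32767:Int) from by omega, *]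
  by_cases h3 : size_gb ≤ (32:Int)
  · simp [show (4:Int) < size_gb from by omega, show (8:Int) < size_gb from by omega, show (16:Int) < size_gb from by omega, show ¬ (32:Int) < size_gb from by omega, show size_gb ≤ (32:Int) from by omega, show ¬ (64:Int) < size_gb from by omega, show size_gb ≤ (64:Int) from by omega, show ¬ (128:Int) < size_gb from by omega, show size_gb ≤ (128:Int) from by omega, show ¬ (256:Int) < size_gb from by omega, show size_gb ≤ (256:Int) from by omega, show ¬ (512:Int) < size_gb from by omega, show size_gb ≤ (512:Int) from by omega, show ¬ (1024:Int) < size_gb from by omega, show size_gb ≤ (1024:Int) from by omega, show ¬ (2048:Int) < size_gb from by omega, show size_gb ≤ (2048:Int) from by omega, show ¬ (4096:Int) < size_gb from by omega, show size_gb ≤ (4096:Int) from by omega, show ¬ (8192:Int) < size_gb from by omega, show size_gb ≤ (8192:Int) from by omega, show ¬ (16384:Int) < size_gb from by omega, show size_gb ≤ (16384:Int) from by omega, show ¬ (32767:Int) < size_gb from by omega, show size_gb ≤ (32767:Int) from by omega, *]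
  by_cases h4 : size_gb ≤ (64:Int)
  · simp [show (4:Int) < size_gb from by omega, show (8:Int) < size_gb from by omega, show (16:Int) < size_gb from by omega, show (32:Int) < size_gb from by omega, show ¬ (64:Int) < size_gb from by omega, show size_gb ≤ (64:Int) from by omega, show ¬ (128:Int) < size_gb from by omega, show size_gb ≤ (128:Int) from by omega, show ¬ (256:Int) < size_gb from by omega, show size_gb ≤ (256:Int) from by omega, show ¬ (512:Int) < size_gb from by omega, show size_gb ≤ (512:Int) from by omega, show ¬ (1024:Int) < size_gb from by omega, show size_gb ≤ (1024:Int) from by omega, show ¬ (2048:Int) < size_gb from by omega, show size_gb ≤ (2048:Int) from by omega, show ¬ (4096:Int) < size_gb from by omega, show size_gb ≤ (4096:Int) from by omega, show ¬ (8192:Int) < size_gb from by omega, show size_gb ≤ (8192:Int) from by omega, show ¬ (16384:Int) < size_gb from by omega, show size_gb ≤ (16384:Int) from by omega, show ¬ (32767:Int) < size_gb from by omega, show size_gb ≤ (32767:Int) from by omega, *]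
  by_cases h5 : size_gb ≤ (128:Int)
  · simp [show (4:Int) < size_gb from by omega, show (8:Int) < size_gb from by omega, show (16:Int) < size_gb from by omega, show (32:Int) < size_gb from by omega, show (64:Int) < size_gb from by omega, show ¬ (128:Int) < size_gb from by omega, show size_gb ≤ (128:Int) from by omega, show ¬ (256:Int) < size_gb from by omega, show size_gb ≤ (256:Int) from by omega, show ¬ (512:Int) < size_gb from by omega, show size_gb ≤ (512:Int) from by omega, show ¬ (1024:Int) < size_gb from by omega, show size_gb ≤ (1024:Int) from by omega, show ¬ (2048:Int) < size_gb from by omega, show size_gb ≤ (2048:Int) from by omega, show ¬ (4096:Int) < size_gb from by omega, show size_gb ≤ (4096:Int) from by omega, show ¬ (8192:Int) < size_gb from by omega, show size_gb ≤ (8192:Int) from by omega, show ¬ (16384:Int) < size_gb from by omega, show size_gb ≤ (16384:Int) from by omega, show ¬ (32767:Int) < size_gb from by omega, show size_gb ≤ (32767:Int) from by omega, *]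
  by_cases h6 : size_gb ≤ (256:Int)
  · simp [show (4:Int) < size_gb from by omega, show (8:Int) < size_gb from by omega, show (16:Int) < size_gb from by omega, show (32:Int) < size_gb from by omega, show (64:Int) < size_gb from by omega, show (128:Int) < size_gb from by omega, show ¬ (256:Int) < size_gb from by omega, show size_gb ≤ (256:Int) from by omega, show ¬ (512:Int) < size_gb from by omega, show size_gb ≤ (512:Int) from by omega, show ¬ (1024:Int) < size_gb from by omega, show size_gb ≤ (1024:Int) from by omega, show ¬ (2048:Int) < size_gb from by omega, show size_gb ≤ (2048:Int) from by omega, show ¬ (4096:Int) < size_gb from by omega, show size_gb ≤ (4096:Int) from by omega, show ¬ (8192:Int) < size_gb from by omega, show size_gb ≤ (8192:Int) from by omega, show ¬ (16384:Int) < size_gb from by omega, show size_gb ≤ (16384:Int) from by omega, show ¬ (32767:Int) < size_gb from by omega, show size_gb ≤ (32767:Int) from by omega, *]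
  by_cases h7 : size_gb ≤ (512:Int)
  · simp [show (4:Int) < size_gb from by omega, show (8:Int) < size_gb from by omega, show (16:Int) < size_gb from by omega, show (32:Int) < size_gb from by omega, show (64:Int) < size_gb from by omega, show (128:Int) < size_gb from by omega, show (256:Int) < size_gb from by omega, show ¬ (512:Int) < size_gb from by omega, show size_gb ≤ (512:Int) from by omega, show ¬ (1024:Int) < size_gb from by omega, show size_gb ≤ (1024:Int) from by omega, show ¬ (2048:Int) < size_gb from by omega, show size_gb ≤ (2048:Int) from by omega, show ¬ (4096:Int) < size_gb from by omega, show size_gb ≤ (4096:Int) from by omega, show ¬ (8192:Int) < size_gb from by omega, show size_gb ≤ (8192:Int) from by omega, show ¬ (16384:Int) < size_gb from by omega, show size_gb ≤ (16384:Int) from by omega, show ¬ (32767:Int) < size_gb from by omega, show size_gb ≤ (32767:Int) from by omega, *]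
  by_cases h8 : size_gb ≤ (1024:Int)
  · simp [show (4:Int) < size_gb from by omega, show (8:Int) < size_gb from by omega, show (16:Int) < size_gb from by omega, show (32:Int) < size_gb from by omega, show (64:Int) < size_gb from by omega, show (128:Int) < size_gb from by omega, show (256:Int) < size_gb from by omega, show (512:Int) < size_gb from by omega, show ¬ (1024:Int) < size_gb from by omega, show size_gb ≤ (1024:Int) from by omega, show ¬ (2048:Int) < size_gb from by omega, show size_gb ≤ (2048:Int) from by omega, show ¬ (4096:Int) < size_gb from by omega, show size_gb ≤ (4096:Int) from by omega, show ¬ (8192:Int) < size_gb from by omega, show size_gb ≤ (8192:Int) from by omega, show ¬ (16384:Int) < size_gb from by omega, show size_gb ≤ (16384:Int) from by omega, show ¬ (32767:Int) < size_gb from by omega, show size_gb ≤ (32767:Int) from by omega, *]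
  by_cases h9 : size_gb ≤ (2048:Int)
  · simp [show (4:Int) < size_gb from by omega, show (8:Int) < size_gb from by omega, show (16:Int) < size_gb from by omega, show (32:Int) < size_gb from by omega, show (64:Int) < size_gb from by omega, show (128:Int) < size_gb from by omega, show (256:Int) < size_gb from by omega, show (512:Int) < size_gb from by omega, show (1024:Int) < size_gb from by omega, show ¬ (2048:Int) < size_gb from by omega, show size_gb ≤ (2048:Int) from by omega, show ¬ (4096:Int) < size_gb from by omega, show size_gb ≤ (4096:Int) from by omega, show ¬ (8192:Int) < size_gb from by omega, show size_gb ≤ (8192:Int) from by omega, show ¬ (16384:Int) < size_gb from by omega, show size_gb ≤ (16384:Int) from by omega, show ¬ (32767:Int) < size_gb from by omega, show size_gb ≤ (32767:Int) from by omega, *]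
  by_cases h10 : size_gb ≤ (4096:Int)
  · simp [show (4:Int) < size_gb from by omega, show (8:Int) < size_gb from by omega, show (16:Int) < size_gb from by omega, show (32:Int) < size_gb from by omega, show (64:Int) < size_gb from by omega, show (128:Int) < size_gb from by omega, show (256:Int) < size_gb from by omega, show (512:Int) < size_gb from by omega, show (1024:Int) < size_gb from by omega, show (2048:Int) < size_gb from by omega, show ¬ (4096:Int) < size_gb from by omega, show size_gb ≤ (4096:Int) from by omega, show ¬ (8192:Int) < size_gb from by omega, show size_gb ≤ (8192:Int) from by omega, show ¬ (16384:Int) < size_gb from by omega, show size_gb ≤ (16384:Int) from by omega, show ¬ (32767:Int) < size_gb from by omega, show size_gb ≤ (32767:Int) from by omega, *]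
  by_cases h11 : size_gb ≤ (8192:Int)
  · simp [show (4:Int) < size_gb from by omega, show (8:Int) < size_gb from by omega, show (16:Int) < size_gb from by omega, show (32:Int) < size_gb from by omega, show (64:Int) < size_gb from by omega, show (128:Int) < size_gb from by omega, show (256:Int) < size_gb from by omega, show (512:Int) < size_gb from by omega, show (1024:Int) < size_gb from by omega, show (2048:Int) < size_gb from by omega, show (4096:Int) < size_gb from by omega, show ¬ (8192:Int) < size_gb from by omega, show size_gb ≤ (8192:Int) from by omega, show ¬ (16384:Int) < size_gb from by omega, show size_gb ≤ (16384:Int) from by omega, show ¬ (32767:Int) < size_gb from by omega, show size_gb ≤ (32767:Int) from by omega, *]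
  by_cases h12 : size_gb ≤ (16384:Int)
  · simp [show (4:Int) < size_gb from by omega, show (8:Int) < size_gb from by omega, show (16:Int) < size_gb from by omega, show (32:Int) < size_gb from by omega, show (64:Int) < size_gb from by omega, show (128:Int) < size_gb from by omega, show (256:Int) < size_gb from by omega, show (512:Int) < size_gb from by omega, show (1024:Int) < size_gb from by omega, show (2048:Int) < size_gb from by omega, show (4096:Int) < size_gb from by omega, show (8192:Int) < size_gb from by omega, show ¬ (16384:Int) < size_gb from by omega, show size_gb ≤ (16384:Int) from by omega, show ¬ (32767:Int) < size_gb from by omega, show size_gb ≤ (32767:Int) from by omega, *]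
  by_cases h13 : size_gb ≤ (32767:Int)
  · simp [show (4:Int) < size_gb from by omega, show (8:Int) < size_gb from by omega, show (16:Int) < size_gb from by omega, show (32:Int) < size_gb from by omega, show (64:Int) < size_gb from by omega, show (128:Int) < size_gb from by omega, show (256:Int) < size_gb from by omega, show (512:Int) < size_gb from by omega, show (1024:Int) < size_gb from by omega, show (2048:Int) < size_gb from by omega, show (4096:Int) < size_gb from by omega, show (8192:Int) < size_gb from by omega, show (16384:Int) < size_gb from by omega, show ¬ (32767:Int) < size_gb from by omega, show size_gb ≤ (32767:Int) from by omega, *]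
  · simp [show (4:Int) < size_gb from by omega, show (8:Int) < size_gb from by omega, show (16:Int) < size_gb from by omega, show (32:Int) < size_gb from by omega, show (64:Int) < size_gb from by omega, show (128:Int) < size_gb from by omega, show (256:Int) < size_gb from by omega, show (512:Int) < size_gb from by omega, show (1024:Int) < size_gb from by omega, show (2048:Int) < size_gb from by omega, show (4096:Int) < size_gb from by omega, show (8192:Int) < size_gb from by omega, show (16384:Int) < size_gb from by omega, show (32767:Int) < size_gb from by omega, *]
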